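-- pv_equiv track=rewrite | github.com/Steven-Stimson/PoreC_QC | script/simulate_digestion.py | replaceN
-- ===== SOURCE A (Python) =====
-- def replaceN(cs):
--     if 'N' not in cs:
--         return [cs]
--     n_positions = [i for i, c in enumerate(cs) if c == 'N']
--     permutations = []
--
--     def _replace(cs, pos=0):
--         if pos >= len(n_positions):
--             permutations.append(cs)
--             return
--         current_pos = n_positions[pos]
--         for nuc in ['A','C','G','T']:
--             new_cs = cs[:current_pos] + nuc + cs[current_pos+1:]
--             _replace(new_cs, pos+1)
--     _replace(cs)
--     return permutations
-- ===== SOURCE B (Python) =====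
-- def replaceN(cs):
--     n_positions = [i for i, c in enumerate(cs) if c == 'N']
--     combos = [[]]
--     for _ in n_positions:
--         combos = [combo + [nuc] for combo in combos for nuc in 'ACGT']
--     out = []
--     for combo in combos:
--         chars = list(cs)
--         for i, nuc in zip(n_positions, combo):
--             chars[i] = nuc
--         out.append(''.join(chars))
--     return out
-- ===== Notes on version B (the rewrite author's own statement) =====
-- stated objective: alternative
-- what changed: Replaces the nested recursive closure that rebuilds the string by slicing at each level with a flat iterative cartesian-product enumeration: build the list of nucleotide combinations breadth-first, then for each combination copy the string once into a list and assign the N positions.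
import Mathlib
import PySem

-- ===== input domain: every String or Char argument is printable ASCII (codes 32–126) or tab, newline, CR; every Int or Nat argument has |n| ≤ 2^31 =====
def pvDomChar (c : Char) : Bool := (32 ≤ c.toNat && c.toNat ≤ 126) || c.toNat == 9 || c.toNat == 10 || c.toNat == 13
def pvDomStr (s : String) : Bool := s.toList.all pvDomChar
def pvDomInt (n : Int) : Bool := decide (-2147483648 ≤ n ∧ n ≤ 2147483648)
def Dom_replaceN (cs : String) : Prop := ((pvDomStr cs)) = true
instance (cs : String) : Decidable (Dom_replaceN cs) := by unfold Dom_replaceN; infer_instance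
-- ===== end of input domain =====

-- B replaces A's recursive slicing closure with a flat iterative cartesian-product enumeration (alternative decomposition).

-- ===== PORT A =====
-- n_positions = [i for i, c in enumerate(cs) if c == 'N']  (the identical comprehension in A and B; shared)
def pvNPosA (l : List Char) : List Int :=
  ((PySem.List.enumerate l 0).filter (fun p => p.2 == 'N')).map (fun p => p.1)

-- the recursive closure _replace, recursing on the remaining suffix of n_positions;
-- appending to `permutations` in loop order is the flatMap over the nucleotide list
def pvReplaceA (cs : List Char) (rest : List Int) : List String :=
  match rest with
  | [] => [String.ofList cs]
  | p :: rest =>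
      (['A', 'C', 'G', 'T'] : List Char).flatMap (fun nuc =>
        pvReplaceA (PySem.List.slice cs none (some p) ++ [nuc] ++
                    PySem.List.slice cs (some (p + 1)) none) rest)

def replaceN (cs : String) : List String :=
  if PySem.Str.isIn "N" cs = false then [cs]
  else pvReplaceA cs.toList (pvNPosA cs.toList)

-- ===== PORT B =====
-- combos = [combo + [nuc] for combo in combos for nuc in 'ACGT']
def pvStep (combos : List (List Char)) : List (List Char) :=
  combos.flatMap (fun combo => "ACGT".toList.map (fun nuc => combo ++ [nuc]))

def replaceN_alt (cs : String) : List String :=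
  let npos := pvNPosA cs.toList
  let combos := npos.foldl (fun cb _ => pvStep cb) [[]]
  combos.map (fun combo =>
    String.ofList ((npos.zip combo).foldl
      (fun chars pr => PySem.List.pySetD chars pr.1 pr.2) cs.toList))

-- ===== PRECONDITION & SPEC =====
def Spec_replaceN (cs : String) (out : List String) : Prop := out = replaceN_alt cs
instance (cs : String) (out : List String) : Decidable (Spec_replaceN cs out) := by unfold Spec_replaceN; infer_instance

-- ===== CLAIM (what is proved, stated in full; the proofs are below) =====
def Claim_equal_replaceN : Prop := ∀ (cs : String), Dom_replaceN cs → Spec_replaceN cs (replaceN cs)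

-- ===== LEMMAS AND PROOFS =====

-- iterated step, the recursive characterisation of B's combos fold
def pvProd : Nat → List (List Char)
  | 0 => [[]]
  | n + 1 => pvStep (pvProd n)

theorem pvFoldl_step_aux (l : List Int) (n : Nat) :
    l.foldl (fun cb _ => pvStep cb) (pvProd n) = pvProd (n + l.length) := by
  induction l generalizing n with
  | nil => simp
  | cons p rest ih =>
      simp only [List.foldl_cons, List.length_cons]
      have : pvStep (pvProd n) = pvProd (n + 1) := rfl
      rw [this, ih]
      ring_nf

theorem pvFoldl_step_eq_prod (l : List Int) :
    l.foldl (fun cb _ => pvStep cb) [[]] = pvProd l.length := by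
  have := pvFoldl_step_aux l 0
  simpa using this

theorem pvProd_cons (n : Nat) :
    pvProd (n + 1) = "ACGT".toList.flatMap (fun c => (pvProd n).map (fun t => c :: t)) := by
  induction n with
  | zero => decide
  | succ n ih =>
      have step_map : ∀ (M : List (List Char)) (c : Char),
          pvStep (M.map (fun t => c :: t)) = (pvStep M).map (fun t => c :: t) := by
        intro M c
        unfold pvStep
        simp [List.flatMap_map, List.map_flatMap]
      calc pvProd (n + 1 + 1) = pvStep (pvProd (n + 1)) := rfl
        _ = pvStep ("ACGT".toList.flatMap (fun c => (pvProd n).map (fun t => c :: t))) := by rw [ih]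
        _ = "ACGT".toList.flatMap (fun c => pvStep ((pvProd n).map (fun t => c :: t))) := by
              unfold pvStep; simp
        _ = "ACGT".toList.flatMap (fun c => (pvStep (pvProd n)).map (fun t => c :: t)) := by
              simp only [step_map]
        _ = "ACGT".toList.flatMap (fun c => (pvProd (n + 1)).map (fun t => c :: t)) := rfl

theorem pvMain (rest : List Int) (cs : List Char)
    (h : ∀ p ∈ rest, 0 ≤ p ∧ p.toNat < cs.length) :
    pvReplaceA cs rest =
      (pvProd rest.length).map (fun combo =>
        String.ofList ((rest.zip combo).foldl
          (fun chars pr => PySem.List.pySetD chars pr.1 pr.2) cs)) := by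
  induction rest generalizing cs with
  | nil => simp [pvReplaceA, pvProd]
  | cons p rest ih =>
      obtain ⟨hp0, hplen⟩ := h p (by simp)
      have hnuc : ("ACGT".toList : List Char) = ['A', 'C', 'G', 'T'] := rfl
      unfold pvReplaceA
      rw [List.length_cons, pvProd_cons, List.map_flatMap, hnuc]
      congr 1
      funext nuc
      have hp1 : (0 : Int) ≤ p + 1 := by omega
      have htn : (p + 1).toNat = p.toNat + 1 := by omega
      have hsub : PySem.List.slice cs none (some p) ++ [nuc] ++
          PySem.List.slice cs (some (p + 1)) none = PySem.List.pySetD cs p nuc := by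
        rw [PySem.List.slice_to cs hp0, PySem.List.slice_from cs hp1,
            PySem.List.pySetD_of_nonneg cs nuc hp0, htn,
            List.set_eq_take_cons_drop _ hplen]
        simp
      rw [hsub]
      have hlen : ∀ q ∈ rest, 0 ≤ q ∧ q.toNat < (PySem.List.pySetD cs p nuc).length := by
        intro q hq
        obtain ⟨h1, h2⟩ := h q (by simp [hq])
        exact ⟨h1, by simpa [PySem.List.pySetD_of_nonneg cs nuc hp0] using h2⟩
      rw [ih _ hlen, List.map_map]
      apply List.map_congr_left
      intro t _
      simp [List.zip_cons_cons]

theorem pvNPos_range (l : List Char) : ∀ p ∈ pvNPosA l, 0 ≤ p ∧ p.toNat < l.length := by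
  intro p hp
  simp only [pvNPosA, List.mem_map, List.mem_filter] at hp
  obtain ⟨pr, ⟨hmem, _⟩, rfl⟩ := hp
  rw [PySem.List.mem_enumerate_iff] at hmem
  obtain ⟨k, hk, rfl⟩ := hmem
  simp only []
  omega

theorem pvNPos_nil_of_not_mem (l : List Char) (h : 'N' ∉ l) : pvNPosA l = [] := by
  simp only [pvNPosA, List.map_eq_nil_iff, List.filter_eq_nil_iff]
  intro pr hmem
  rw [PySem.List.mem_enumerate_iff] at hmem
  obtain ⟨k, hk, rfl⟩ := hmem
  simp only [beq_iff_eq]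
  intro hEq
  exact h (hEq ▸ List.getElem_mem hk)

-- ===== VERDICT (by name: the statement is the Claim_ definition above) =====
theorem replaceN_spec : Claim_equal_replaceN := by
  intro cs _
  unfold Spec_replaceN replaceN replaceN_alt
  simp only [pvFoldl_step_eq_prod]
  rw [← pvMain _ _ (pvNPos_range cs.toList)]
  by_cases hN : PySem.Str.isIn "N" cs = false
  · rw [if_pos hN]
    have hnot : 'N' ∉ cs.toList := by
      intro hmem
      obtain ⟨s, t, hst⟩ := List.mem_iff_append.mp hmem
      have : (("N" : String).toList) <:+: cs.toList := by
        rw [hst]; exact ⟨s, t, by simp⟩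
      have h2 : PySem.Str.isIn "N" cs = true := (PySem.Str.isIn_iff_infix _ _).mpr this
      rw [hN] at h2
      exact Bool.false_ne_true h2
    rw [pvNPos_nil_of_not_mem _ hnot]
    simp [pvReplaceA, String.ofList]
  · rw [if_neg hN]
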